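-- pv_equiv track=rewrite | github.com/JParrales/mision-tic-2021-ciclo_python | G55/Reto 3/compras.py | compras
-- ===== SOURCE A (Python) =====
-- def compras(diccionario: dict) -> str:
--
--     if diccionario:
--         valores = list(diccionario.values())
--         mayor = max(valores)
--         llaves = []
--
--         for key, value in diccionario.items():
--
--             if value == mayor:
--                 llaves.append(key)
--
--         return ', '.join(llaves)
--
--     else:
--         return "No hay productos comprados"
-- ===== SOURCE B (Python) =====
-- def compras(diccionario: dict) -> str:
--     best = None
--     llaves = []
--     for key, value in diccionario.items():
--         if best is None or value > best:
--             best = value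
--             llaves = [key]
--         elif value == best:
--             llaves.append(key)
--     if best is None:
--         return "No hay productos comprados"
--     return ', '.join(llaves)
-- ===== Notes on version B (the rewrite author's own statement) =====
-- stated objective: alternative
-- what changed: Replaced A's two-pass max()-then-filter with a single pass that maintains a running best value and the list of keys attaining it (reset on a new max, append on a tie).
import Mathlib
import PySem

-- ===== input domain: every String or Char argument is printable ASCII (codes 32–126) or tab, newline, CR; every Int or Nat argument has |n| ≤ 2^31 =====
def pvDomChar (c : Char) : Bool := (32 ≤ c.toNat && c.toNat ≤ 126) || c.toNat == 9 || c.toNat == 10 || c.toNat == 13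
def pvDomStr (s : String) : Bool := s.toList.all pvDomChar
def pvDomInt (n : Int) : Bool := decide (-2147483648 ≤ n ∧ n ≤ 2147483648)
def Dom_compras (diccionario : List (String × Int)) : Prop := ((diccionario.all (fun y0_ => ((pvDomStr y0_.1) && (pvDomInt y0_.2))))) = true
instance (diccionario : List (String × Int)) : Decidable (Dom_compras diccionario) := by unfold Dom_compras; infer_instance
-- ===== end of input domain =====

-- B replaces A's two-pass max-then-filter with a single running-max pass; alternative decomposition, same cost.

-- ===== PORT A =====
def compras (diccionario : List (String × Int)) : String :=
  match diccionario with
  | [] => "No hay productos comprados"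
  | _ :: _ =>
    let valores := diccionario.map (fun kv => kv.2)
    match PySem.List.max? valores (fun y => y) with
    | none => ""   -- unreachable: valores is nonempty here
    | some mayor =>
      let llaves : List String :=
        diccionario.foldl (fun acc kv => if kv.2 = mayor then acc ++ [kv.1] else acc) []
      PySem.Str.join ", " llaves

-- ===== PORT B =====
def comprasStep (st : Option Int × List String) (kv : String × Int) : Option Int × List String :=
  match st.1 with
  | none => (some kv.2, [kv.1])
  | some b =>
    if kv.2 > b then (some kv.2, [kv.1])
    else if kv.2 = b then (st.1, st.2 ++ [kv.1])
    else st

def compras_alt (diccionario : List (String × Int)) : String :=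
  let st := diccionario.foldl comprasStep (none, [])
  match st.1 with
  | none => "No hay productos comprados"
  | some _ => PySem.Str.join ", " st.2

-- ===== PRECONDITION & SPEC =====
def Spec_compras (diccionario : List (String × Int)) (out : String) : Prop := out = compras_alt diccionario
instance (diccionario : List (String × Int)) (out : String) : Decidable (Spec_compras diccionario out) := by unfold Spec_compras; infer_instance

-- ===== CLAIM (what is proved, stated in full; the proofs are below) =====
def Claim_equal_compras : Prop := ∀ (diccionario : List (String × Int)), Dom_compras diccionario → Spec_compras diccionario (compras diccionario)

-- ===== LEMMAS AND PROOFS =====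

-- running max over pairs
def runMax (l : List (String × Int)) (m : Int) : Int := l.foldl (fun a p => max a p.2) m

theorem le_runMax (l : List (String × Int)) (m : Int) : m ≤ runMax l m := by
  induction l generalizing m with
  | nil => simp [runMax]
  | cons x t ih =>
    simp only [runMax, List.foldl_cons]
    exact le_trans (le_max_left m x.2) (ih (max m x.2))

-- invariant of B's loop once a best value exists
theorem fold_inv (l : List (String × Int)) (m : Int) (ks : List String) :
    l.foldl comprasStep (some m, ks)
      = (some (runMax l m),
         (if runMax l m = m then ks else [])
           ++ (l.filter (fun p => p.2 = runMax l m)).map Prod.fst) := by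
  induction l generalizing m ks with
  | nil => simp [runMax]
  | cons x t ih =>
    obtain ⟨k, v⟩ := x
    have hM : runMax ((k, v) :: t) m = runMax t (max m v) := by simp [runMax]
    by_cases hgt : v > m
    · have hstep : comprasStep (some m, ks) (k, v) = (some v, [k]) := by
        simp [comprasStep, hgt]
      have hmv : max m v = v := by omega
      rw [List.foldl_cons, hstep, ih, hM, hmv]
      have hMne : runMax t v ≠ m := by
        have := le_runMax t v; omega
      by_cases hMv : runMax t v = v
      · simp only [hMv, if_true]
        simp
        omega
      · have hvne : ¬ v = runMax t v := fun h => hMv h.symm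
        simp [hMne, hMv, hvne]
    · by_cases heq : v = m
      · have hstep : comprasStep (some m, ks) (k, v) = (some m, ks ++ [k]) := by
          simp [comprasStep, heq]
        have hmv : max m v = m := by omega
        rw [List.foldl_cons, hstep, ih, hM, hmv]
        by_cases hMm : runMax t m = m
        · simp [hMm, heq, List.append_assoc]
        · have hvne : ¬ v = runMax t m := by rw [heq]; exact fun h => hMm h.symm
          simp [hMm, hvne]
      · have hstep : comprasStep (some m, ks) (k, v) = (some m, ks) := by
          simp [comprasStep, hgt, heq]
        have hmv : max m v = m := by omega
        rw [List.foldl_cons, hstep, ih, hM, hmv]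
        have hvne : ¬ v = runMax t m := by
          have := le_runMax t m; omega
        simp [hvne]

-- A's filter loop, written as a filter
theorem foldl_appif (l : List (String × Int)) (m : Int) (acc : List String) :
    l.foldl (fun acc kv => if kv.2 = m then acc ++ [kv.1] else acc) acc
      = acc ++ (l.filter (fun p => p.2 = m)).map Prod.fst := by
  induction l generalizing acc with
  | nil => simp
  | cons x t ih =>
    by_cases h : x.2 = m
    · simp [h, ih]
    · simp [h, ih]

-- ===== VERDICT (by name: the statement is the Claim_ definition above) =====
theorem compras_spec : Claim_equal_compras := by
  intro diccionario _
  unfold Spec_compras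
  match diccionario with
  | [] => rfl
  | (k, v) :: t =>
    have hstep0 : comprasStep (none, []) (k, v) = (some v, [k]) := rfl
    have hmax : PySem.List.max? (((k, v) :: t).map (fun kv => kv.2)) (fun y => y)
        = some (runMax t v) := by
      rw [List.map_cons, PySem.List.max?_id_cons, List.foldl_map]
      rfl
    simp only [compras, compras_alt, List.foldl_cons, hstep0, fold_inv, hmax, foldl_appif]
    by_cases hMv : runMax t v = v
    · simp [hMv]
    · have hvne : ¬ v = runMax t v := fun h => hMv h.symm
      simp [hMv, hvne]
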